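-- pv_equiv track=rewrite | github.com/iampaavan/CoderByte | QuestionsMarks.py | quesmark
-- ===== SOURCE A (Python) =====
-- def quesmark(str):
-- 	a, b = 0, 0
-- 	for i in range(0, len(str) - 1):
-- 		for j in range(i, len(str) - 1):
-- 			if str[i].isdigit() and str[j].isdigit() and int(str[i]) + int(str[j]) == 10:
-- 				a, b = i, j
--
-- 	new = str[a: b+1]
-- 	if new.count('?') == 3:
-- 		return True
-- 	else:
-- 		return False
-- ===== SOURCE B (Python) =====
-- def quesmark(str):
--     idx = range(len(str) - 1)
--     last = {}
--     for k in idx: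
--         if str[k].isdigit():
--             last[int(str[k])] = k
--     a, b = 0, 0
--     for i in idx:
--         if str[i].isdigit():
--             j = last.get(10 - int(str[i]), -1)
--             if j >= i:
--                 a, b = i, j
--     return str[a:b + 1].count('?') == 3
-- ===== Notes on version B (the rewrite author's own statement) =====
-- stated objective: faster
-- what changed: Replaces A's O(n^2) nested rescan with two linear passes: one pass builds a last-position table per digit value, a second pass picks the largest valid i and reads its partner j straight from the table.
import Mathlib
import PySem

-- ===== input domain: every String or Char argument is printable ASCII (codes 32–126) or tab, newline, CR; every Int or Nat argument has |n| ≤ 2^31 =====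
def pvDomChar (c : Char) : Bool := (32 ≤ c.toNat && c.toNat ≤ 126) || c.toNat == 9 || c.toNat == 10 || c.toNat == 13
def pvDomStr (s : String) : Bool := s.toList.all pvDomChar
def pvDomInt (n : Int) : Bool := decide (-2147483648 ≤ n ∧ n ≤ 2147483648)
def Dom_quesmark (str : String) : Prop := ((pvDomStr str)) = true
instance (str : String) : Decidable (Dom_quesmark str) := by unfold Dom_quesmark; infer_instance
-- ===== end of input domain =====

-- B replaces A's quadratic nested scan by two linear passes: a last-position table for each
-- digit value, then one pass picking the largest valid i and its partner (objective: faster).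

-- int(c) for a single character; exact, and only ever used under an isdigit guard
def pyDigitInt (c : Char) : Int := (PySem.Int.ofChars? [c]).getD 0

-- ===== PORT A =====
def quesmark (str : String) : Bool :=
  let s := str.toList
  let n : Int := PySem.Str.len str
  let ab : Int × Int :=
    (PySem.List.pyRange 0 (n - 1) 1).foldl (fun ab i =>
      (PySem.List.pyRange i (n - 1) 1).foldl (fun ab j =>
        if PySem.Chars.isdigit (PySem.List.pyGetD s i ' ') &&
           PySem.Chars.isdigit (PySem.List.pyGetD s j ' ') &&
           (pyDigitInt (PySem.List.pyGetD s i ' ') +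
            pyDigitInt (PySem.List.pyGetD s j ' ') == 10)
        then (i, j) else ab) ab) ((0 : Int), (0 : Int))
  let new := PySem.List.slice s (some ab.1) (some (ab.2 + 1))
  PySem.Chars.count new ['?'] == 3

-- ===== PORT B =====
def quesmark_alt (str : String) : Bool :=
  let s := str.toList
  let idx := PySem.List.pyRange 0 (PySem.Str.len str - 1) 1
  let last : PySem.Dict Int Int :=
    idx.foldl (fun d k =>
      if PySem.Chars.isdigit (PySem.List.pyGetD s k ' ')
      then d.insert (pyDigitInt (PySem.List.pyGetD s k ' ')) k else d) PySem.Dict.empty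
  let ab : Int × Int :=
    idx.foldl (fun ab i =>
      if PySem.Chars.isdigit (PySem.List.pyGetD s i ' ') then
        let j := last.getD (10 - pyDigitInt (PySem.List.pyGetD s i ' ')) (-1)
        if j ≥ i then (i, j) else ab
      else ab) ((0 : Int), (0 : Int))
  let new := PySem.List.slice s (some ab.1) (some (ab.2 + 1))
  PySem.Chars.count new ['?'] == 3

-- ===== PRECONDITION & SPEC =====
def Spec_quesmark (str : String) (out : Bool) : Prop := out = quesmark_alt str
instance (str : String) (out : Bool) : Decidable (Spec_quesmark str out) := by unfold Spec_quesmark; infer_instance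

-- ===== CLAIM (what is proved, stated in full; the proofs are below) =====
def Claim_equal_quesmark : Prop := ∀ (str : String), Dom_quesmark str → Spec_quesmark str (quesmark str)

-- ===== LEMMAS AND PROOFS =====

-- A's inner loop: keep (i, j) for the LAST j in l satisfying p
theorem foldl_keep_last {i : Int} (p : Int → Bool) :
    ∀ (l : List Int) (ab : Int × Int),
      l.foldl (fun ab j => if p j then (i, j) else ab) ab =
        match (l.filter p).getLast? with
        | some j => (i, j)
        | none => ab := by
  intro l
  induction l using List.reverseRecOn with
  | nil => intro ab; rfl
  | append_singleton l x ih =>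
    intro ab
    rw [List.foldl_append, List.filter_append]
    simp only [List.foldl_cons, List.foldl_nil, List.filter_cons, List.filter_nil]
    by_cases hx : p x
    · simp [hx]
    · simp [hx, ih]

-- the dict loop: lookup at c returns the LAST k in l with q k ∧ v k = c
theorem get?_foldl_insert_last (q : Int → Bool) (v : Int → Int) (c : Int) :
    ∀ (l : List Int) (d : PySem.Dict Int Int),
      (l.foldl (fun d k => if q k then d.insert (v k) k else d) d).get? c =
        match (l.filter (fun k => q k && (v k == c))).getLast? with
        | some k => some k
        | none => d.get? c := by
  intro l
  induction l using List.reverseRecOn with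
  | nil => intro d; rfl
  | append_singleton l x ih =>
    intro d
    rw [List.foldl_append, List.filter_append]
    simp only [List.foldl_cons, List.foldl_nil, List.filter_cons, List.filter_nil]
    by_cases hq : q x
    · by_cases hv : v x = c
      · subst hv
        simp only [hq, BEq.rfl, Bool.and_self, if_true, List.getLast?_concat]
        rw [PySem.Dict.get?_insert_self]
      · have hb : ((v x == c) : Bool) = false := by simp [hv]
        simp only [hq, hb, Bool.and_false, if_true]
        rw [PySem.Dict.get?_insert_of_ne]
        · simpa using ih d
        · omega
    · have hq' : q x = false := by simpa using hq
      simp only [hq', Bool.false_and]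
      simpa using ih d

-- the heart of the equivalence: for each outer index i, A's inner rescan computes
-- exactly what B reads off the precomputed last-position table
theorem ab_eq (D : Int → Bool) (v : Int → Int) (m : Int) :
    (PySem.List.pyRange 0 m 1).foldl (fun ab i =>
        (PySem.List.pyRange i m 1).foldl (fun ab j =>
          if D i && D j && (v i + v j == 10) then (i, j) else ab) ab) ((0:Int), (0:Int)) =
    (PySem.List.pyRange 0 m 1).foldl (fun ab i =>
        if D i then
          let j := (((PySem.List.pyRange 0 m 1).foldl (fun d k =>
              if D k then d.insert (v k) k else d) PySem.Dict.empty).getD (10 - v i) (-1))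
          if j ≥ i then (i, j) else ab
        else ab) ((0:Int), (0:Int)) := by
  apply PySem.List.foldl_congr_mem
  intro ab i hi
  obtain ⟨h0i, him⟩ := PySem.List.mem_pyRange_one.mp hi
  rw [foldl_keep_last]
  by_cases hDi : D i
  · have hfc : ((PySem.List.pyRange i m 1).filter (fun j => D i && D j && (v i + v j == 10)))
        = ((PySem.List.pyRange i m 1).filter (fun k => D k && (v k == 10 - v i))) := by
      apply List.filter_congr
      intro j _
      simp only [hDi, Bool.true_and]
      cases hDj : D j
      · simp
      · simp only [Bool.true_and]
        rw [Bool.eq_iff_iff]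
        simp only [beq_iff_eq]
        omega
    have hget := get?_foldl_insert_last D v (10 - v i) (PySem.List.pyRange 0 m 1) PySem.Dict.empty
    have hsplit : ((PySem.List.pyRange 0 m 1).filter (fun k => D k && (v k == 10 - v i)))
        = ((PySem.List.pyRange 0 i 1).filter (fun k => D k && (v k == 10 - v i)))
          ++ ((PySem.List.pyRange i m 1).filter (fun k => D k && (v k == 10 - v i))) := by
      rw [← List.filter_append, ← PySem.List.pyRange_one_append 0 i m h0i (le_of_lt him)]
    rw [hsplit] at hget
    rw [hfc, if_pos hDi]
    cases h2 : ((PySem.List.pyRange i m 1).filter (fun k => D k && (v k == 10 - v i))).getLast? with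
    | some j =>
      have hjmem : j ∈ (PySem.List.pyRange i m 1).filter (fun k => D k && (v k == 10 - v i)) :=
        List.mem_of_getLast? h2
      have hij : i ≤ j := (PySem.List.mem_pyRange_one.mp (List.mem_filter.mp hjmem).1).1
      have hne : ((PySem.List.pyRange i m 1).filter (fun k => D k && (v k == 10 - v i))) ≠ [] := by
        intro hnil; rw [hnil] at h2; simp at h2
      rw [List.getLast?_append_of_ne_nil _ hne, h2] at hget
      rw [PySem.Dict.getD_eq_get?_getD, hget]
      simp only [Option.getD_some]
      rw [if_pos hij]
    | none =>
      have hnil : ((PySem.List.pyRange i m 1).filter (fun k => D k && (v k == 10 - v i))) = [] :=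
        List.getLast?_eq_none_iff.mp h2
      rw [hnil, List.append_nil] at hget
      cases h1 : ((PySem.List.pyRange 0 i 1).filter (fun k => D k && (v k == 10 - v i))).getLast? with
      | some k =>
        have hkmem : k ∈ (PySem.List.pyRange 0 i 1).filter (fun k => D k && (v k == 10 - v i)) :=
          List.mem_of_getLast? h1
        have hki : k < i := (PySem.List.mem_pyRange_one.mp (List.mem_filter.mp hkmem).1).2
        rw [h1] at hget
        rw [PySem.Dict.getD_eq_get?_getD, hget]
        simp only [Option.getD_some]
        rw [if_neg (by omega)]
      | none =>
        rw [h1, PySem.Dict.get?_empty] at hget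
        rw [PySem.Dict.getD_eq_get?_getD, hget]
        simp only [Option.getD_none]
        rw [if_neg (by omega)]
  · have hfil : ((PySem.List.pyRange i m 1).filter (fun j => D i && D j && (v i + v j == 10))) = [] := by
      rw [List.filter_eq_nil_iff]
      intro j _
      simp [hDi]
    rw [hfil, if_neg hDi]
    rfl

theorem quesmark_spec : Claim_equal_quesmark := by
  intro str _
  unfold Spec_quesmark
  show quesmark str = quesmark_alt str
  have habs := ab_eq (fun i => PySem.Chars.isdigit (PySem.List.pyGetD str.toList i ' '))
                     (fun i => pyDigitInt (PySem.List.pyGetD str.toList i ' '))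
                     (PySem.Str.len str - 1)
  exact congrArg (fun ab : Int × Int =>
    (PySem.Chars.count (PySem.List.slice str.toList (some ab.1) (some (ab.2 + 1))) ['?'] == 3)) habs
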